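-- pv_equiv track=rewrite | github.com/Andrewgo12/sql-analyzer-enterprise | sql_analysis_engine.py | _analyze_execution_plan
-- ===== SOURCE A (Python) =====
-- from typing import Dict, List, Any, Optional
--
-- def _analyze_execution_plan(statements: List[str]) -> Dict[str, Any]:
--     """Analyze potential execution plan issues"""
--     return {
--         'table_scans': len([s for s in statements if 'WHERE' not in s.upper() and 'SELECT' in s.upper()]),
--         'join_operations': sum(s.upper().count('JOIN') for s in statements),
--         'subqueries': sum(s.upper().count('SELECT') - 1 for s in statements if s.upper().count('SELECT') > 1),
--         'sorting_operations': sum(s.upper().count('ORDER BY') for s in statements),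
--         'grouping_operations': sum(s.upper().count('GROUP BY') for s in statements)
--     }
-- ===== SOURCE B (Python) =====
-- def _scan(u):
--     """One left-to-right positional scan of an uppercased statement, matching all
--     keywords at each position (instead of one library count per keyword)."""
--     wh = False
--     nj = ns = no = ng = 0
--     i = 0
--     n = len(u)
--     while i < n:
--         if u.startswith('WHERE', i):
--             wh = True
--         if u.startswith('JOIN', i):
--             nj += 1
--         if u.startswith('SELECT', i):
--             ns += 1
--         if u.startswith('ORDER BY', i):
--             no += 1
--         if u.startswith('GROUP BY', i):
--             ng += 1
--         i += 1
--     return wh, nj, ns, no, ng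
--
--
-- def _analyze_execution_plan(statements):
--     """Analyze potential execution plan issues via a single positional keyword scan
--     per statement (keywords have no self-overlap, so positional counts equal
--     str.count's non-overlapping counts)."""
--     ts = jo = sq = so = go = 0
--     for s in statements:
--         wh, nj, ns, no, ng = _scan(s.upper())
--         if not wh and ns > 0:
--             ts += 1
--         jo += nj
--         if ns > 1:
--             sq += ns - 1
--         so += no
--         go += ng
--     return {
--         'table_scans': ts,
--         'join_operations': jo,
--         'subqueries': sq,
--         'sorting_operations': so,
--         'grouping_operations': go,
--     }
-- ===== Notes on version B (the rewrite author's own statement) =====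
-- stated objective: alternative
-- what changed: Replaced the five str.count/'in' library passes per statement with one positional left-to-right scan that matches all five keywords simultaneously at each index (correct because none of the keywords has a self-overlap, so positional counts equal str.count's non-overlapping counts).
import Mathlib
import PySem

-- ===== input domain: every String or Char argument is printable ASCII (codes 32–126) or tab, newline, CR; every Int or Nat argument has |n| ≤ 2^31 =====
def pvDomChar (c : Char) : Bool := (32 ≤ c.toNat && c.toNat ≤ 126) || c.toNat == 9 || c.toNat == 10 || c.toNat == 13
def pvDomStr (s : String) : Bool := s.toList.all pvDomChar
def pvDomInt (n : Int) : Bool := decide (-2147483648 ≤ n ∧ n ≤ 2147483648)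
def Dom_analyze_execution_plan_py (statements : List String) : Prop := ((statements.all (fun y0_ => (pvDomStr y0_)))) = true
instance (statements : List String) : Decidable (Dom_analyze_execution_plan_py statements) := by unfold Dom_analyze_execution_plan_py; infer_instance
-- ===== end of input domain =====

-- B replaces the five per-statement library count/membership scans with one positional scan matching all keywords at each index (alternative decomposition, similar cost).

-- ===== PORT A =====
def analyze_execution_plan_py (statements : List String) : List (String × Int) :=
  [("table_scans", ((statements.filter (fun s => !(PySem.Str.isIn "WHERE" (PySem.Str.upper s)) && PySem.Str.isIn "SELECT" (PySem.Str.upper s))).length : Int)),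
   ("join_operations", (statements.map (fun s => (PySem.Str.count (PySem.Str.upper s) "JOIN" : Int))).sum),
   ("subqueries", ((statements.filter (fun s => PySem.Str.count (PySem.Str.upper s) "SELECT" > 1)).map (fun s => (PySem.Str.count (PySem.Str.upper s) "SELECT" : Int) - 1)).sum),
   ("sorting_operations", (statements.map (fun s => (PySem.Str.count (PySem.Str.upper s) "ORDER BY" : Int))).sum),
   ("grouping_operations", (statements.map (fun s => (PySem.Str.count (PySem.Str.upper s) "GROUP BY" : Int))).sum)]

-- ===== PORT B =====
-- B helper: the positional scan of _scan — recursion over the suffixes of the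
-- uppercased statement ('while i < n … i += 1' with startswith(kw, i) tests).
def scanGo : List Char → Bool → Nat → Nat → Nat → Nat → Bool × Nat × Nat × Nat × Nat
  | [], wh, nj, ns, no, ng => (wh, nj, ns, no, ng)
  | l@(_ :: t), wh, nj, ns, no, ng =>
    scanGo t (wh || "WHERE".toList.isPrefixOf l)
      (if "JOIN".toList.isPrefixOf l then nj + 1 else nj)
      (if "SELECT".toList.isPrefixOf l then ns + 1 else ns)
      (if "ORDER BY".toList.isPrefixOf l then no + 1 else no)
      (if "GROUP BY".toList.isPrefixOf l then ng + 1 else ng)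

def planLoopB : List String → Int → Int → Int → Int → Int → Int × Int × Int × Int × Int
  | [], ts, jo, sq, so, go => (ts, jo, sq, so, go)
  | s :: rest, ts, jo, sq, so, go =>
    match scanGo (PySem.Str.upper s).toList false 0 0 0 0 with
    | (wh, nj, ns, no, ng) =>
      planLoopB rest (if !wh && decide (0 < ns) then ts + 1 else ts)
        (jo + (nj : Int))
        (if 1 < ns then sq + ((ns : Int) - 1) else sq)
        (so + (no : Int)) (go + (ng : Int))

def analyze_execution_plan_py_alt (statements : List String) : List (String × Int) :=
  match planLoopB statements 0 0 0 0 0 with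
  | (ts, jo, sq, so, go) =>
    [("table_scans", ts), ("join_operations", jo), ("subqueries", sq),
     ("sorting_operations", so), ("grouping_operations", go)]

-- ===== PRECONDITION & SPEC =====
def Spec_analyze_execution_plan_py (statements : List String) (out : List (String × Int)) : Prop := out = analyze_execution_plan_py_alt statements
instance (statements : List String) (out : List (String × Int)) : Decidable (Spec_analyze_execution_plan_py statements out) := by unfold Spec_analyze_execution_plan_py; infer_instance

-- ===== CLAIM (what is proved, stated in full; the proofs are below) =====
def Claim_equal_analyze_execution_plan_py : Prop := ∀ (statements : List String), Dom_analyze_execution_plan_py statements → Spec_analyze_execution_plan_py statements (analyze_execution_plan_py statements)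

-- ===== LEMMAS AND PROOFS =====

def occ (sub : List Char) : List Char → Nat
  | [] => 0
  | l@(_ :: t) => (if sub.isPrefixOf l then 1 else 0) + occ sub t

lemma occ_pos_iff_exists (sub : List Char) (hsub : sub ≠ []) (l : List Char) :
    0 < occ sub l ↔ ∃ j, sub <+: l.drop j := by
  induction l with
  | nil =>
    simp only [occ, List.drop_nil]
    constructor
    · omega
    · rintro ⟨j, h⟩
      exact absurd (List.prefix_nil.mp h) hsub
  | cons x t ih =>
    simp only [occ]
    constructor
    · intro h
      by_cases hp : sub.isPrefixOf (x :: t)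
      · exact ⟨0, by simpa [List.isPrefixOf_iff_prefix] using hp⟩
      · simp [hp] at h
        obtain ⟨j, hj⟩ := ih.mp h
        exact ⟨j + 1, by simpa using hj⟩
    · rintro ⟨j, hj⟩
      cases j with
      | zero =>
        simp at hj
        have : sub.isPrefixOf (x :: t) = true := List.isPrefixOf_iff_prefix.mpr hj
        simp [this]
      | succ j =>
        have : 0 < occ sub t := ih.mpr ⟨j, by simpa using hj⟩
        omega

lemma occ_pos_iff_isIn (sub : List Char) (hsub : sub ≠ []) (l : List Char) :
    0 < occ sub l ↔ PySem.Chars.isIn sub l = true :=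
  (occ_pos_iff_exists sub hsub l).trans (PySem.Chars.exists_prefix_drop_iff_isIn sub l)

def NoBorder (sub : List Char) : Prop :=
  ∀ k, k < sub.length → 0 < k → sub.take (sub.length - k) ≠ sub.drop k

lemma noBorder_of_all (sub : List Char)
    (h : ((List.range sub.length).all fun k =>
        decide (k = 0) || decide (sub.take (sub.length - k) ≠ sub.drop k)) = true) :
    NoBorder sub := by
  intro k hk hk0
  have := (List.all_eq_true.mp h) k (List.mem_range.mpr hk)
  simp only [Bool.or_eq_true, decide_eq_true_eq] at this
  rcases this with h0 | hne
  · omega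
  · exact hne

lemma occ_cons (sub : List Char) (x : Char) (t : List Char) :
    occ sub (x :: t) = (if sub.isPrefixOf (x :: t) then 1 else 0) + occ sub t := rfl

lemma occ_decide_eq_isIn (sub : List Char) (hsub : sub ≠ []) (l : List Char) :
    decide (0 < occ sub l) = PySem.Chars.isIn sub l := by
  by_cases h : 0 < occ sub l
  · rw [decide_eq_true h, (occ_pos_iff_isIn sub hsub l).mp h]
  · have h2 : PySem.Chars.isIn sub l ≠ true :=
      fun hc => h ((occ_pos_iff_isIn sub hsub l).mpr hc)
    rw [decide_eq_false h, ((Bool.not_eq_true _).mp h2)]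

lemma occ_drop_append {sub : List Char} (hb : NoBorder sub) (r : List Char) :
    ∀ (m k : Nat), 0 < k → k + m = sub.length → occ sub (sub.drop k ++ r) = occ sub r := by
  intro m
  induction m with
  | zero =>
    intro k hk hkm
    have : sub.drop k = [] := by
      apply List.drop_eq_nil_of_le; omega
    simp [this]
  | succ m ih =>
    intro k hk hkm
    have hklt : k < sub.length := by omega
    obtain ⟨c, hc⟩ : ∃ c, sub.drop k = c :: sub.drop (k + 1) := by
      refine ⟨sub[k], ?_⟩
      rw [List.drop_eq_getElem_cons hklt]
    have hpf : sub.isPrefixOf (sub.drop k ++ r) = false := by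
      by_contra h
      have hp : sub <+: sub.drop k ++ r := by simpa using h
      obtain ⟨t, ht⟩ := hp
      have h1 : (sub ++ t).take (sub.length - k) = sub.take (sub.length - k) :=
        List.take_append_of_le_length (by omega)
      have h2 : ((sub.drop k ++ r)).take (sub.length - k) = sub.drop k := by
        rw [List.take_append_of_le_length (by simp)]
        simp
      rw [ht] at h1
      exact hb k hklt hk (h1.symm.trans h2)
    have step : occ sub (sub.drop k ++ r) =
        (if sub.isPrefixOf (sub.drop k ++ r) then 1 else 0) + occ sub (sub.drop (k + 1) ++ r) := by
      rw [hc]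
      rfl
    rw [step, hpf]
    simpa using ih (k + 1) (by omega) (by omega)

lemma occ_append_self {sub : List Char} (hsub : sub ≠ []) (hb : NoBorder sub) (r : List Char) :
    occ sub (sub ++ r) = 1 + occ sub r := by
  obtain ⟨c, s', rfl⟩ := List.exists_cons_of_ne_nil hsub
  have hpf : (c :: s').isPrefixOf ((c :: s') ++ r) = true :=
    List.isPrefixOf_iff_prefix.mpr (List.prefix_append _ _)
  have h1 : occ (c :: s') ((c :: s') ++ r) =
      (if (c :: s').isPrefixOf ((c :: s') ++ r) then 1 else 0) + occ (c :: s') (s' ++ r) := rfl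
  have h2 := occ_drop_append hb r ((c :: s').length - 1) 1 (by omega) (by simp; omega)
  simp only [List.drop_one, List.tail_cons] at h2
  rw [h1, hpf, h2]
  simp

lemma count_go_eq_occ {sub : List Char} (hsub : sub ≠ []) (hb : NoBorder sub) :
    ∀ (fuel : Nat) (l : List Char) (acc : Nat), l.length ≤ fuel →
      PySem.Chars.count.go sub fuel l acc = acc + occ sub l := by
  intro fuel
  induction fuel with
  | zero =>
    intro l acc hl
    have : l = [] := List.eq_nil_of_length_eq_zero (by omega)
    subst this
    simp [PySem.Chars.count.go, occ]
  | succ fuel ih =>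
    intro l acc hl
    cases l with
    | nil => simp [PySem.Chars.count.go, occ]
    | cons x t =>
      by_cases hp : sub.isPrefixOf (x :: t)
      · have hpre := List.isPrefixOf_iff_prefix.mp hp
        obtain ⟨r, hr⟩ := hpre
        have hdrop : (x :: t).drop sub.length = r := by
          rw [← hr, List.drop_append_of_le_length (le_refl _)]
          simp
        have hlen : ((x :: t).drop sub.length).length ≤ fuel := by
          have h0 : 0 < sub.length := List.length_pos_of_ne_nil hsub
          simp only [List.length_drop, List.length_cons]
          simp only [List.length_cons] at hl
          omega
        rw [show PySem.Chars.count.go sub (fuel + 1) (x :: t) acc =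
              PySem.Chars.count.go sub fuel ((x :: t).drop sub.length) (acc + 1) by
            simp [PySem.Chars.count.go, hp]]
        rw [ih _ _ hlen, hdrop]
        have : occ sub (x :: t) = 1 + occ sub r := by
          rw [← hr]; exact occ_append_self hsub hb r
        rw [← hr] at this ⊢
        omega
      · rw [show PySem.Chars.count.go sub (fuel + 1) (x :: t) acc =
              PySem.Chars.count.go sub fuel t acc by simp [PySem.Chars.count.go, hp]]
        rw [ih t acc (by simpa using Nat.lt_succ_iff.mp (by simpa using hl))]
        simp [occ, hp]

lemma count_eq_occ {sub : List Char} (hsub : sub ≠ []) (hb : NoBorder sub) (l : List Char) :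
    PySem.Chars.count l sub = occ sub l := by
  rw [PySem.Chars.count]
  simp only [List.isEmpty_iff]
  rw [if_neg hsub]
  simpa using count_go_eq_occ hsub hb l.length l 0 (le_refl _)

lemma scanGo_eq (l : List Char) (wh : Bool) (nj ns no ng : Nat) :
    scanGo l wh nj ns no ng =
      (wh || decide (0 < occ "WHERE".toList l),
       nj + occ "JOIN".toList l, ns + occ "SELECT".toList l,
       no + occ "ORDER BY".toList l, ng + occ "GROUP BY".toList l) := by
  induction l generalizing wh nj ns no ng with
  | nil => simp [scanGo, occ]
  | cons x t ih =>
    simp only [scanGo, ih, Prod.mk.injEq]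
    refine ⟨?_, ?_, ?_, ?_, ?_⟩
    · rw [occ_cons]
      cases "WHERE".toList.isPrefixOf (x :: t) <;> (simp; try rfl)
    · rw [occ_cons]; split_ifs <;> omega
    · rw [occ_cons]; split_ifs <;> omega
    · rw [occ_cons]; split_ifs <;> omega
    · rw [occ_cons]; split_ifs <;> omega

lemma scan_stmt_eq (s : String) :
    scanGo (PySem.Str.upper s).toList false 0 0 0 0 =
      (PySem.Str.isIn "WHERE" (PySem.Str.upper s),
       PySem.Str.count (PySem.Str.upper s) "JOIN",
       PySem.Str.count (PySem.Str.upper s) "SELECT",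
       PySem.Str.count (PySem.Str.upper s) "ORDER BY",
       PySem.Str.count (PySem.Str.upper s) "GROUP BY") := by
  rw [scanGo_eq]
  rw [PySem.Str.isIn_eq, PySem.Str.count_eq, PySem.Str.count_eq, PySem.Str.count_eq,
    PySem.Str.count_eq]
  rw [count_eq_occ (by decide) (noBorder_of_all _ (by decide)),
    count_eq_occ (by decide) (noBorder_of_all _ (by decide)),
    count_eq_occ (by decide) (noBorder_of_all _ (by decide)),
    count_eq_occ (by decide) (noBorder_of_all _ (by decide))]
  simp only [Bool.false_or, Nat.zero_add]
  congr 1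
  exact occ_decide_eq_isIn _ (by decide) _

lemma planLoopB_eq (l : List String) (ts jo sq so go : Int) :
    planLoopB l ts jo sq so go =
      (ts + ((l.filter (fun s => !(PySem.Str.isIn "WHERE" (PySem.Str.upper s)) && PySem.Str.isIn "SELECT" (PySem.Str.upper s))).length : Int),
       jo + (l.map (fun s => (PySem.Str.count (PySem.Str.upper s) "JOIN" : Int))).sum,
       sq + ((l.filter (fun s => PySem.Str.count (PySem.Str.upper s) "SELECT" > 1)).map (fun s => (PySem.Str.count (PySem.Str.upper s) "SELECT" : Int) - 1)).sum,
       so + (l.map (fun s => (PySem.Str.count (PySem.Str.upper s) "ORDER BY" : Int))).sum,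
       go + (l.map (fun s => (PySem.Str.count (PySem.Str.upper s) "GROUP BY" : Int))).sum) := by
  induction l generalizing ts jo sq so go with
  | nil => simp [planLoopB]
  | cons s rest ih =>
    have hsel : (decide (0 < PySem.Str.count (PySem.Str.upper s) "SELECT")) =
        PySem.Str.isIn "SELECT" (PySem.Str.upper s) := by
      rw [PySem.Str.isIn_eq, PySem.Str.count_eq,
        count_eq_occ (by decide) (noBorder_of_all _ (by decide))]
      exact occ_decide_eq_isIn _ (by decide) _
    simp only [planLoopB, scan_stmt_eq, ih, List.filter_cons, List.map_cons, List.sum_cons]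
    rw [← hsel]
    by_cases hw : PySem.Str.isIn "WHERE" (PySem.Str.upper s) = true <;>
      by_cases hs : 0 < PySem.Str.count (PySem.Str.upper s) "SELECT" <;>
      by_cases h1 : 1 < PySem.Str.count (PySem.Str.upper s) "SELECT" <;>
      simp only [hw, hs, h1, decide_true, decide_false, Bool.not_true, Bool.not_false,
        Bool.and_true, Bool.and_false, if_true, if_false, gt_iff_lt] <;>
      first
        | (exfalso; omega)
        | (refine Prod.ext ?_ (Prod.ext ?_ (Prod.ext ?_ (Prod.ext ?_ ?_))) <;> simp <;>
            omega)

-- ===== VERDICT (by name: the statement is the Claim_ definition above) =====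
theorem analyze_execution_plan_py_spec : Claim_equal_analyze_execution_plan_py := by
  intro statements _
  show _ = _
  simp [analyze_execution_plan_py, analyze_execution_plan_py_alt, planLoopB_eq]
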